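-- pv_equiv track=rewrite | github.com/maxcai314/chorale-generator | pitch.py | interval_to_text
-- ===== SOURCE A (Python) =====
-- _BASE_TONAL_INTERVALS = {
--     1: 0,  # Unison
--     2: 2,  # Major Second
--     3: 4,  # Major Third
--     4: 5,  # Perfect Fourth
--     5: 7,  # Perfect Fifth
--     6: 9,  # Major Sixth
--     7: 11, # Major Seventh
--     8: 12  # Octave
-- }
--
-- def interval_to_text(semitones: int) -> str:
--     """Convert semitone distance to interval text (e.g., 'm3', 'P5', 'A4')."""
--     if semitones < 0:
--         raise ValueError("Semitones must be non-negative")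
--     octaves, base_interval = divmod(semitones, 12)
--
--     # Find the closest base interval in _BASE_TONAL_INTERVALS value set
--     # greater than or equal to base_interval
--     # i.e. the number 10 would be 1 less than 11 (Major Seventh)
--     possible_intervals = sorted(_BASE_TONAL_INTERVALS.items(), key=lambda x: x[1])
--     for tonal_interval, base_semitones in possible_intervals:
--         if base_semitones >= base_interval:
--             semitone_diff = base_interval - base_semitones
--             tonal_interval_number = tonal_interval
--             break
--     else:
--         raise ValueError(f"No base interval found for {semitones} semitones")
--     # Determine quality based on semitone_diff
--     if tonal_interval_number in [1, 4, 5, 8]:  # Perfect intervals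
--         if semitone_diff == 0:
--             quality = 'P'
--         elif semitone_diff == 1:
--             quality = 'A'
--         elif semitone_diff == -1:
--             quality = 'd'
--         else:
--             raise ValueError(f"No valid quality for {semitones} semitones")
--     elif tonal_interval_number in [2, 3, 6, 7]:  # Major/Minor intervals
--         if semitone_diff == 0:
--             quality = 'M'
--         elif semitone_diff == -1:
--             quality = 'm'
--         elif semitone_diff == 1:
--             quality = 'A'
--         elif semitone_diff == -2:
--             quality = 'd'
--         else:
--             raise ValueError(f"No valid quality for {semitones} semitones")
--     else:
--         raise ValueError(f"No valid interval number for {semitones} semitones")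
--
--     interval_number = tonal_interval_number + octaves * 7
--     return f"{quality}{interval_number}"
-- ===== SOURCE B (Python) =====
-- _INTERVAL_TABLE = {
--     0: ('P', 1), 1: ('m', 2), 2: ('M', 2), 3: ('m', 3),
--     4: ('M', 3), 5: ('P', 4), 6: ('d', 5), 7: ('P', 5),
--     8: ('m', 6), 9: ('M', 6), 10: ('m', 7), 11: ('M', 7),
-- }
--
-- def interval_to_text(semitones: int) -> str:
--     """Convert semitone distance to interval text (e.g., 'm3', 'P5')."""
--     if semitones < 0:
--         raise ValueError("Semitones must be non-negative")
--     octaves, base_interval = divmod(semitones, 12)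
--     if base_interval not in _INTERVAL_TABLE:
--         raise ValueError(f"No base interval found for {semitones} semitones")
--     quality, degree = _INTERVAL_TABLE[base_interval]
--     return f"{quality}{degree + octaves * 7}"
-- ===== Notes on version B (the rewrite author's own statement) =====
-- stated objective: simpler
-- what changed: Replaced the sort + linear threshold scan + diff-based quality branches with a single precomputed table mapping base_interval 0..11 directly to (quality, degree), followed by one O(1) lookup.
import Mathlib
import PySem

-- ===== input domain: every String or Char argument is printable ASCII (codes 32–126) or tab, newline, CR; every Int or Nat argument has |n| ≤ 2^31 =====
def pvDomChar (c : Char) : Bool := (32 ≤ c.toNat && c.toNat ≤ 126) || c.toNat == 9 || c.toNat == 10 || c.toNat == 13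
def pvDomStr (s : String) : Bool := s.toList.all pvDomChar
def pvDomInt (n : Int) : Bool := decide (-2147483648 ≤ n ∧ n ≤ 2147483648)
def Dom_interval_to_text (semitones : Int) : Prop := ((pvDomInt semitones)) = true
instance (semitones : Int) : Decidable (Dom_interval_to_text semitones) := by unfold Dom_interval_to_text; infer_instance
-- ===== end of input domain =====

-- B replaces A's sort + threshold scan + quality branches with one precomputed
-- base_interval → (quality, degree) table lookup (objective: simpler).

-- ===== PORT A =====
-- _BASE_TONAL_INTERVALS as an association list in insertion order
def pvBaseTonalIntervals : List (Int × Int) :=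
  [(1, 0), (2, 2), (3, 4), (4, 5), (5, 7), (6, 9), (7, 11), (8, 12)]

-- body after the negative guard and divmod; "" marks paths where Python raises
def pvAQuality (tonal_interval_number semitone_diff : Int) : String :=
  if tonal_interval_number ∈ ([1, 4, 5, 8] : List Int) then
    if semitone_diff = 0 then "P"
    else if semitone_diff = 1 then "A"
    else if semitone_diff = -1 then "d"
    else ""  -- raise ValueError
  else if tonal_interval_number ∈ ([2, 3, 6, 7] : List Int) then
    if semitone_diff = 0 then "M"
    else if semitone_diff = -1 then "m"
    else if semitone_diff = 1 then "A"
    else if semitone_diff = -2 then "d"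
    else ""  -- raise ValueError
  else ""  -- raise ValueError

def pvABody (octaves base_interval : Int) : String :=
  let possible_intervals := PySem.List.sorted (key := fun x => x.2) pvBaseTonalIntervals
  match possible_intervals.find? (fun p => decide (base_interval ≤ p.2)) with
  | none => ""  -- for-else: raise ValueError
  | some (tonal_interval_number, base_semitones) =>
    let semitone_diff := base_interval - base_semitones
    let quality := pvAQuality tonal_interval_number semitone_diff
    if quality = "" then ""  -- raise ValueError
    else quality ++ PySem.Int.toStr (tonal_interval_number + octaves * 7)

def interval_to_text (semitones : Int) : String :=
  if semitones < 0 then ""  -- raise ValueError (excluded by Pre_)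
  else pvABody (PySem.Int.floordiv semitones 12) (PySem.Int.mod semitones 12)

-- ===== PORT B =====
def pvIntervalTable : PySem.Dict Int (String × Int) :=
  PySem.Dict.ofList
    [(0, ("P", 1)), (1, ("m", 2)), (2, ("M", 2)), (3, ("m", 3)),
     (4, ("M", 3)), (5, ("P", 4)), (6, ("d", 5)), (7, ("P", 5)),
     (8, ("m", 6)), (9, ("M", 6)), (10, ("m", 7)), (11, ("M", 7))]

def interval_to_text_alt (semitones : Int) : String :=
  if semitones < 0 then ""  -- raise ValueError (excluded by Pre_)
  else
    let octaves := PySem.Int.floordiv semitones 12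
    let base_interval := PySem.Int.mod semitones 12
    match PySem.Dict.get? pvIntervalTable base_interval with
    | none => ""  -- raise ValueError (unreachable for integer input)
    | some (quality, degree) => quality ++ PySem.Int.toStr (degree + octaves * 7)

-- ===== PRECONDITION & SPEC =====
-- Pre_ excludes negative semitones, on which Python A raises ValueError.
def Pre_interval_to_text (semitones : Int) : Prop := 0 ≤ semitones
instance (semitones : Int) : Decidable (Pre_interval_to_text semitones) := by unfold Pre_interval_to_text; infer_instance
def pvWitness_interval_to_text : Int := (7)

def Spec_interval_to_text (semitones : Int) (out : String) : Prop := out = interval_to_text_alt semitones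
instance (semitones : Int) (out : String) : Decidable (Spec_interval_to_text semitones out) := by unfold Spec_interval_to_text; infer_instance

-- ===== CLAIM (what is proved, stated in full; the proofs are below) =====
def Claim_equal_interval_to_text : Prop := ∀ (semitones : Int), Dom_interval_to_text semitones → Pre_interval_to_text semitones → Spec_interval_to_text semitones (interval_to_text semitones)

-- ===== LEMMAS AND PROOFS =====

-- both bodies agree for any octave count once the residue 0 ≤ r < 12 is fixed
lemma pv_body_eq (q r : Int) (h0 : 0 ≤ r) (h1 : r < 12) :
    pvABody q r =
      (match PySem.Dict.get? pvIntervalTable r with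
       | none => ""
       | some (quality, degree) => quality ++ PySem.Int.toStr (degree + q * 7)) := by
  interval_cases r <;> rfl

-- ===== VERDICT (by name: the statement is the Claim_ definition above) =====
theorem interval_to_text_spec : Claim_equal_interval_to_text := by
  intro s _ hs
  unfold Spec_interval_to_text interval_to_text interval_to_text_alt
  have hns : ¬ s < 0 := not_lt.mpr hs
  simp only [hns, if_false]
  have hmod : PySem.Int.mod s 12 = s % 12 := PySem.Int.mod_eq_emod_of_pos (by omega)
  exact pv_body_eq _ _ (by rw [hmod]; exact Int.emod_nonneg s (by omega))
    (by rw [hmod]; exact Int.emod_lt_of_pos s (by omega))
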